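-- pv_equiv track=rewrite | github.com/lupg-oak/matstatlab | diskretna.py | emphirichna_funcziya
-- ===== SOURCE A (Python) =====
-- def emphirichna_funcziya(numbers2, n):
--     sum = 0
--     dictionary = dict()
--     temp = 0
--     id = 0
--     for i, j in numbers2.items():
--         if id == 0:
--             dictionary.update({'0':f"x<{i}"})
--             id += 1
--         else:
--             dictionary.update({f"{sum}/{n}":f"{temp}<=x<{i}"})
--         sum+=j
--         if sum == n:
--             dictionary.update({'1':f"x>={i}"})
--         temp = i
--     return dictionary
-- ===== SOURCE B (Python) =====
-- def emphirichna_funcziya(numbers2, n):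
--     ks = list(numbers2)
--     vs = list(numbers2.values())
--     events = [
--         ev
--         for i, k in enumerate(ks)
--         for ev in (
--             ([('0', f"x<{k}")] if i == 0
--              else [(f"{sum(vs[:i])}/{n}", f"{ks[i-1]}<=x<{k}")])
--             + ([('1', f"x>={k}")] if sum(vs[:i + 1]) == n else [])
--         )
--     ]
--     return dict(events)
-- ===== Notes on version B (the rewrite author's own statement) =====
-- stated objective: alternative
-- what changed: Replaces A's stateful loop that mutates a dict while carrying a running sum, a prev-key and a first-iteration flag by a declarative pipeline: one flat comprehension over enumerate(keys) emits the stream of (key, value) update events, reading cumulative counts as slice sums sum(vs[:i]) and the previous key by index, and a single dict(events) constructor builds the result.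
import Mathlib
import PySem

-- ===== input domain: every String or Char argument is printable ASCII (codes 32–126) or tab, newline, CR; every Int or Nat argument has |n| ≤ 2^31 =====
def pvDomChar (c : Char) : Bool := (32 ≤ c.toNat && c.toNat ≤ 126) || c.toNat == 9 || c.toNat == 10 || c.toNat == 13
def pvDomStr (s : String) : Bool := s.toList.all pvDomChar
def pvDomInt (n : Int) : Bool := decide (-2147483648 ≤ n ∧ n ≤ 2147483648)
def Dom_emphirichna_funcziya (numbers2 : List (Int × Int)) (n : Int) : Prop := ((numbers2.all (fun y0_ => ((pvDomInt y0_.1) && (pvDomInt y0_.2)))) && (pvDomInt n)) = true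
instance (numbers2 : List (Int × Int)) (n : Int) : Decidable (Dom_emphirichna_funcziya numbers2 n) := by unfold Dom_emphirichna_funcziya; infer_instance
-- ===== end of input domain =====

-- B replaces A's stateful dict-mutating loop (running sum, prev-key, first-iteration flag) by a
-- declarative pipeline: a flat comprehension generating the stream of (key, value) update events
-- with slice sums sum(vs[:i]), then one dict(events) constructor (objective: alternative).

-- ===== PORT A =====
-- A's loop body: state is (sum, dictionary, temp, id)
def pvAStep (n : Int) (st : Int × PySem.Dict String String × Int × Int) (ij : Int × Int) :
    Int × PySem.Dict String String × Int × Int :=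
  let sum := st.1; let dictionary := st.2.1; let temp := st.2.2.1; let id := st.2.2.2
  let i := ij.1; let j := ij.2
  let dictionary :=
    if id == 0 then dictionary.insert "0" ("x<" ++ PySem.Int.toStr i)
    else dictionary.insert (PySem.Int.toStr sum ++ "/" ++ PySem.Int.toStr n)
           (PySem.Int.toStr temp ++ "<=x<" ++ PySem.Int.toStr i)
  let id := if id == 0 then id + 1 else id
  let sum := sum + j
  let dictionary :=
    if sum == n then dictionary.insert "1" ("x>=" ++ PySem.Int.toStr i) else dictionary
  (sum, dictionary, i, id)

def emphirichna_funcziya (numbers2 : List (Int × Int)) (n : Int) : List (String × String) :=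
  ((numbers2.foldl (pvAStep n) (0, PySem.Dict.empty, 0, 0)).2.1).items

-- ===== PORT B =====
-- Source B's comprehension body at one (i, k) of enumerate(ks): the update events it yields
def pvEventsAt (n : Int) (ks vs : List Int) (p : Int × Int) : List (String × String) :=
  let i := p.1; let k := p.2
  (if i == 0 then [("0", "x<" ++ PySem.Int.toStr k)]
   else [(PySem.Int.toStr (PySem.List.slice vs none (some i)).sum ++ "/" ++ PySem.Int.toStr n,
          PySem.Int.toStr (PySem.List.pyGetD ks (i - 1) 0) ++ "<=x<" ++ PySem.Int.toStr k)])
  ++ (if (PySem.List.slice vs none (some (i + 1))).sum == n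
      then [("1", "x>=" ++ PySem.Int.toStr k)] else [])

def emphirichna_funcziya_alt (numbers2 : List (Int × Int)) (n : Int) : List (String × String) :=
  let ks := numbers2.map (·.1)
  let vs := numbers2.map (·.2)
  let events := (PySem.List.enumerate ks).flatMap (pvEventsAt n ks vs)
  -- dict(events): first occurrence fixes the position, a later duplicate overwrites the value
  (events.foldl (fun (d : PySem.Dict String String) e => d.insert e.1 e.2) PySem.Dict.empty).items

-- ===== PRECONDITION & SPEC =====
def Spec_emphirichna_funcziya (numbers2 : List (Int × Int)) (n : Int) (out : List (String × String)) : Prop := out = emphirichna_funcziya_alt numbers2 n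
instance (numbers2 : List (Int × Int)) (n : Int) (out : List (String × String)) : Decidable (Spec_emphirichna_funcziya numbers2 n out) := by unfold Spec_emphirichna_funcziya; infer_instance

-- ===== CLAIM (what is proved, stated in full; the proofs are below) =====
def Claim_equal_emphirichna_funcziya : Prop := ∀ (numbers2 : List (Int × Int)) (n : Int), Dom_emphirichna_funcziya numbers2 n → Spec_emphirichna_funcziya numbers2 n (emphirichna_funcziya numbers2 n)

-- ===== LEMMAS AND PROOFS =====

-- prefix sum of the first m frequencies
def pvPsum : List (Int × Int) → Nat → Int
  | _, 0 => 0
  | [], _ + 1 => 0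
  | x :: t, k + 1 => x.2 + pvPsum t k

theorem pvPsum_eq_take (L : List (Int × Int)) : ∀ m : Nat,
    pvPsum L m = ((L.map (·.2)).take m).sum := by
  induction L with
  | nil => intro m; cases m <;> simp [pvPsum]
  | cons x t ih =>
      intro m
      cases m with
      | zero => simp [pvPsum]
      | succ m => simp [pvPsum, ih m]

theorem pvPsum_succ (L : List (Int × Int)) : ∀ (m : Nat) (h : m < L.length),
    pvPsum L (m + 1) = pvPsum L m + (L[m]'h).2 := by
  induction L with
  | nil => intro m h; simp at h
  | cons x t ih =>
      intro m h
      cases m with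
      | zero => simp [pvPsum]
      | succ m =>
          simp only [pvPsum, List.getElem_cons_succ]
          rw [ih m (by simpa using h)]
          ring

-- core invariant: from index m ≥ 1 on, A's dict fold equals B's event fold
theorem pvCore (n : Int) (L : List (Int × Int)) : ∀ (rest : List (Int × Int)) (m : Nat)
    (d : PySem.Dict String String) (s t : Int),
    rest = L.drop m → 1 ≤ m → m ≤ L.length → s = pvPsum L m →
    (∀ h : m - 1 < L.length, t = (L[m - 1]'h).1) →
    (rest.foldl (pvAStep n) (s, d, t, 1)).2.1
      = ((PySem.List.enumerate (rest.map (·.1)) (m : Int)).flatMap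
           (pvEventsAt n (L.map (·.1)) (L.map (·.2)))).foldl
          (fun (d : PySem.Dict String String) e => d.insert e.1 e.2) d := by
  intro rest
  induction rest with
  | nil => intro m d s t _ _ _ _ _; simp
  | cons x rest ih =>
      intro m d s t hdrop hm hml hs ht
      have hmlt : m < L.length := by
        by_contra hcon
        have : L.drop m = [] := List.drop_eq_nil_of_le (by omega)
        rw [this] at hdrop; exact absurd hdrop (by simp)
      have hcons : x :: rest = L[m]'hmlt :: L.drop (m + 1) := by
        rw [hdrop]; exact List.drop_eq_getElem_cons hmlt
      have hx : x = L[m]'hmlt := (List.cons.injEq _ _ _ _ ▸ hcons).1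
      have hrest : rest = L.drop (m + 1) := (List.cons.injEq _ _ _ _ ▸ hcons).2
      have hm1 : m - 1 < L.length := by omega
      simp only [List.map_cons, PySem.List.enumerate_cons, List.flatMap_cons, List.foldl_append,
        List.foldl_cons]
      have hBne : ((m : Int) == 0) = false := by
        simp only [beq_eq_false_iff_ne]; omega
      have hidx1 : ((m : Int) - 1) = ((m - 1 : Nat) : Int) := by omega
      have hslice : (PySem.List.slice (L.map (·.2)) none (some (m : Int))).sum = s := by
        rw [PySem.List.slice_to_natCast, hs, pvPsum_eq_take]
      have hsliceNext :
          (PySem.List.slice (L.map (·.2)) none (some ((m : Int) + 1))).sum = s + x.2 := by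
        have : ((m : Int) + 1) = ((m + 1 : Nat) : Int) := by omega
        rw [this, PySem.List.slice_to_natCast, ← pvPsum_eq_take, pvPsum_succ L m hmlt, hs, hx]
      have hkprev : PySem.List.pyGetD (L.map (·.1)) ((m : Int) - 1) 0 = t := by
        rw [hidx1, PySem.List.pyGetD_natCast, List.getD_eq_getElem?_getD,
            List.getElem?_map, List.getElem?_eq_getElem hm1]
        simpa using (ht hm1).symm
      have hev : pvEventsAt n (L.map (·.1)) (L.map (·.2)) ((m : Int), x.1) =
          [(PySem.Int.toStr s ++ "/" ++ PySem.Int.toStr n,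
            PySem.Int.toStr t ++ "<=x<" ++ PySem.Int.toStr x.1)]
          ++ (if s + x.2 == n then [("1", "x>=" ++ PySem.Int.toStr x.1)] else []) := by
        simp only [pvEventsAt, hBne, Bool.false_eq_true, if_false, hslice, hsliceNext, hkprev]
      have hstepA : pvAStep n (s, d, t, 1) x =
          (s + x.2,
           (if s + x.2 == n
            then (d.insert (PySem.Int.toStr s ++ "/" ++ PySem.Int.toStr n)
                    (PySem.Int.toStr t ++ "<=x<" ++ PySem.Int.toStr x.1)).insert "1"
                    ("x>=" ++ PySem.Int.toStr x.1)
            else d.insert (PySem.Int.toStr s ++ "/" ++ PySem.Int.toStr n)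
                    (PySem.Int.toStr t ++ "<=x<" ++ PySem.Int.toStr x.1)),
           x.1, 1) := by
        simp [pvAStep]
      rw [hev, hstepA]
      have hcast : ((m : Int) + 1) = ((m + 1 : Nat) : Int) := by omega
      rw [hcast]
      have hrec := ih (m + 1)
        (((if s + x.2 == n
            then (d.insert (PySem.Int.toStr s ++ "/" ++ PySem.Int.toStr n)
                    (PySem.Int.toStr t ++ "<=x<" ++ PySem.Int.toStr x.1)).insert "1"
                    ("x>=" ++ PySem.Int.toStr x.1)
            else d.insert (PySem.Int.toStr s ++ "/" ++ PySem.Int.toStr n)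
                    (PySem.Int.toStr t ++ "<=x<" ++ PySem.Int.toStr x.1))))
        (s + x.2) x.1 hrest (by omega) (by omega)
        (by rw [pvPsum_succ L m hmlt, hs, hx]) (fun h => by simp [hx])
      rw [hrec]
      congr 1
      by_cases hc : (s + x.2 == n) = true <;> simp [hc]

theorem pvMain (numbers2 : List (Int × Int)) (n : Int) :
    emphirichna_funcziya numbers2 n = emphirichna_funcziya_alt numbers2 n := by
  unfold emphirichna_funcziya emphirichna_funcziya_alt
  cases numbers2 with
  | nil => simp
  | cons x t =>
      congr 1
      simp only [List.map_cons, PySem.List.enumerate_cons, List.flatMap_cons, List.foldl_append,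
        List.foldl_cons]
      have hslice1 :
          (PySem.List.slice (x.2 :: t.map (·.2)) none (some ((0 : Int) + 1))).sum = x.2 := by
        have : ((0 : Int) + 1) = ((1 : Nat) : Int) := by norm_num
        rw [this, PySem.List.slice_to_natCast]
        simp
      have hev : pvEventsAt n (x.1 :: t.map (·.1)) (x.2 :: t.map (·.2)) ((0 : Int), x.1) =
          [("0", "x<" ++ PySem.Int.toStr x.1)]
          ++ (if x.2 == n then [("1", "x>=" ++ PySem.Int.toStr x.1)] else []) := by
        simp only [pvEventsAt, hslice1]
        norm_num
      have hstepA : pvAStep n (0, PySem.Dict.empty, 0, 0) x =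
          (x.2,
           (if x.2 == n
            then ((PySem.Dict.empty : PySem.Dict String String).insert "0"
                    ("x<" ++ PySem.Int.toStr x.1)).insert "1" ("x>=" ++ PySem.Int.toStr x.1)
            else (PySem.Dict.empty : PySem.Dict String String).insert "0"
                    ("x<" ++ PySem.Int.toStr x.1)),
           x.1, 1) := by
        simp [pvAStep]
      rw [hev, hstepA]
      have h01 : ((0 : Int) + 1) = ((1 : Nat) : Int) := by norm_num
      rw [h01]
      have hrec := pvCore n (x :: t) t 1
        ((if x.2 == n
          then ((PySem.Dict.empty : PySem.Dict String String).insert "0"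
                  ("x<" ++ PySem.Int.toStr x.1)).insert "1" ("x>=" ++ PySem.Int.toStr x.1)
          else (PySem.Dict.empty : PySem.Dict String String).insert "0"
                  ("x<" ++ PySem.Int.toStr x.1)))
        x.2 x.1 (by simp) (by omega) (by simp) (by simp [pvPsum]) (fun h => by simp)
      rw [hrec]
      congr 1
      by_cases hc : (x.2 == n) = true <;> simp [hc]

-- ===== VERDICT (by name: the statement is the Claim_ definition above) =====
theorem emphirichna_funcziya_spec : Claim_equal_emphirichna_funcziya := by
  intro numbers2 n _
  unfold Spec_emphirichna_funcziya
  exact pvMain numbers2 n
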